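-- pv_equiv track=rewrite | github.com/octavianbuciumas/nsi-codes | 0 - Épreuve pratique/16.py | recherche_indices_classement
-- ===== SOURCE A (Python) =====
-- def recherche_indices_classement(elt,tab):
--     tab_inf = []
--     tab_ega = []
--     tab_sup = []
--     for indice in range(len(tab)):
--         if tab[indice] < elt:
--             tab_inf.append(indice)
--         elif tab[indice] == elt:
--             tab_ega.append(indice)
--         else:
--             tab_sup.append(indice)
--     return (tab_inf,tab_ega,tab_sup)
-- ===== SOURCE B (Python) =====
-- def recherche_indices_classement(elt, tab):
--     pairs = list(enumerate(tab))
--     tab_inf = [i for i, v in pairs if v < elt]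
--     tab_ega = [i for i, v in pairs if v == elt]
--     tab_sup = [i for i, v in pairs if not (v < elt) and not (v == elt)]
--     return (tab_inf, tab_ega, tab_sup)
-- ===== Notes on version B (the rewrite author's own statement) =====
-- stated objective: simpler
-- what changed: Replaces the single index loop with three accumulators by three independent comprehensions over enumerate(tab), one per bucket.
import Mathlib
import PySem

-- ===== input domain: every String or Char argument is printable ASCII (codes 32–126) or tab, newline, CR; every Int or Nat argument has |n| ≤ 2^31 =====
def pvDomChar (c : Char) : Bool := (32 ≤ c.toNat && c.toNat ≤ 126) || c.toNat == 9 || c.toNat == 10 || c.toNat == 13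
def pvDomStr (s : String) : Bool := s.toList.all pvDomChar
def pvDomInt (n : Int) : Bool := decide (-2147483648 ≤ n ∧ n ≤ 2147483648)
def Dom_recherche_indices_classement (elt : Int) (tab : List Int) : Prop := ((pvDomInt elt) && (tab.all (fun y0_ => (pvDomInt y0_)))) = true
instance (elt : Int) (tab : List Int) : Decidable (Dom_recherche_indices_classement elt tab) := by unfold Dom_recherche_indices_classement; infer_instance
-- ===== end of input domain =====

-- B replaces A's single three-accumulator index loop by three independent comprehensions over enumerate(tab) (objective: simpler).

-- ===== PORT A =====
-- 'for indice in range(len(tab))': fold over pyRange; tab[indice] is always in range, so pyGetD with default 0 is exact here.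
def recherche_indices_classement (elt : Int) (tab : List Int) : List Int × List Int × List Int :=
  (PySem.List.pyRange 0 (PySem.List.len tab) 1).foldl
    (fun (acc : List Int × List Int × List Int) indice =>
      if PySem.List.pyGetD tab indice 0 < elt then (acc.1 ++ [indice], acc.2.1, acc.2.2)
      else if PySem.List.pyGetD tab indice 0 = elt then (acc.1, acc.2.1 ++ [indice], acc.2.2)
      else (acc.1, acc.2.1, acc.2.2 ++ [indice]))
    ([], [], [])

-- ===== PORT B =====
def recherche_indices_classement_alt (elt : Int) (tab : List Int) : List Int × List Int × List Int :=
  let pairs := PySem.List.enumerate tab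
  ((pairs.filter (fun p => p.2 < elt)).map (fun p => p.1),
   (pairs.filter (fun p => p.2 = elt)).map (fun p => p.1),
   (pairs.filter (fun p => ¬ (p.2 < elt) ∧ ¬ (p.2 = elt))).map (fun p => p.1))

-- ===== PRECONDITION & SPEC =====
def Spec_recherche_indices_classement (elt : Int) (tab : List Int) (out : List Int × List Int × List Int) : Prop := out = recherche_indices_classement_alt elt tab
instance (elt : Int) (tab : List Int) (out : List Int × List Int × List Int) : Decidable (Spec_recherche_indices_classement elt tab out) := by unfold Spec_recherche_indices_classement; infer_instance

-- ===== CLAIM (what is proved, stated in full; the proofs are below) =====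
def Claim_equal_recherche_indices_classement : Prop := ∀ (elt : Int) (tab : List Int), Dom_recherche_indices_classement elt tab → Spec_recherche_indices_classement elt tab (recherche_indices_classement elt tab)

-- ===== LEMMAS AND PROOFS =====

-- A's loop over indices, re-read as a loop over enumerate(tab): each index j pairs with tab[j].
lemma loopA_over_enumerate (elt : Int) (tab : List Int) :
    recherche_indices_classement elt tab =
      (PySem.List.enumerate tab).foldl
        (fun (acc : List Int × List Int × List Int) p =>
          if p.2 < elt then (acc.1 ++ [p.1], acc.2.1, acc.2.2)
          else if p.2 = elt then (acc.1, acc.2.1 ++ [p.1], acc.2.2)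
          else (acc.1, acc.2.1, acc.2.2 ++ [p.1]))
        ([], [], []) := by
  unfold recherche_indices_classement
  rw [PySem.List.enumerate_eq_map_pyRange (d := 0), List.foldl_map]

-- A's loop invariant: each bucket is the starting accumulator followed by the matching indices.
lemma loopA_filter (elt : Int) (l : List (Int × Int)) (acc : List Int × List Int × List Int) :
    l.foldl
        (fun (acc : List Int × List Int × List Int) p =>
          if p.2 < elt then (acc.1 ++ [p.1], acc.2.1, acc.2.2)
          else if p.2 = elt then (acc.1, acc.2.1 ++ [p.1], acc.2.2)
          else (acc.1, acc.2.1, acc.2.2 ++ [p.1]))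
        acc =
      (acc.1 ++ (l.filter (fun p => p.2 < elt)).map (fun p => p.1),
       acc.2.1 ++ (l.filter (fun p => p.2 = elt)).map (fun p => p.1),
       acc.2.2 ++ (l.filter (fun p => ¬ (p.2 < elt) ∧ ¬ (p.2 = elt))).map (fun p => p.1)) := by
  induction l generalizing acc with
  | nil => simp
  | cons p l ih =>
    simp only [List.foldl_cons, List.filter_cons]
    rcases lt_trichotomy p.2 elt with h | h | h
    · have h1 : ¬ p.2 = elt := by omega
      simp [h, h1, ih]
    · have h1 : ¬ p.2 < elt := by omega
      simp [h, ih]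
    · have h1 : ¬ p.2 < elt := by omega
      have h2 : ¬ p.2 = elt := by omega
      simp [h1, h2, ih]

theorem recherche_indices_classement_spec_aux (elt : Int) (tab : List Int) :
    recherche_indices_classement elt tab = recherche_indices_classement_alt elt tab := by
  rw [loopA_over_enumerate, loopA_filter]
  simp [recherche_indices_classement_alt]

-- ===== VERDICT (by name: the statement is the Claim_ definition above) =====
theorem recherche_indices_classement_spec : Claim_equal_recherche_indices_classement := by
  intro elt tab _
  unfold Spec_recherche_indices_classement
  exact recherche_indices_classement_spec_aux elt tab
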